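-- pv_equiv track=rewrite | github.com/jrcasso/readme-generator | generate.py | format_volumes_table
-- ===== SOURCE A (Python) =====
-- from typing import List, Dict, Set, Optional, Any, Tuple, Iterator
--
-- def generate_html_table(headers: List[str], rows: List[List[str]]) -> str:
--     if not rows:
--         return ""
--     num_cols = len(headers)
--     non_empty_cols = []
--     for col_index in range(num_cols):
--         if any(row[col_index].strip() for row in rows):
--             non_empty_cols.append(col_index)
--     new_headers = [headers[i] for i in non_empty_cols]
--     new_rows = [[row[i] for i in non_empty_cols] for row in rows]
--     table = "<table style='border-collapse: collapse;'>"
--     table += "<tr>" + \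
--         "".join(
--             f"<th style='border: 1px solid #ddd; padding:4px;'>{h}</th>" for h in new_headers) + "</tr>"
--     for row in new_rows:
--         table += "<tr>" + \
--             "".join(
--                 f"<td style='border: 1px solid #ddd; padding:4px;'>{cell}</td>" for cell in row) + "</tr>"
--     table += "</table>"
--     return table
--
-- def format_volumes_table(volumes_list: List[str]) -> str:
--     def format_host(host: str) -> str:
--         if (host == "."):
--             return "(Project directory)"
--         return host
--
--     rows = []
--     for vol in volumes_list:
--         parts = vol.split(":")
--         host = format_host(parts[0]) if len(parts) > 0 else ""
--         container = parts[1] if len(parts) > 1 else ""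
--         mode = parts[2] if len(parts) > 2 else ""
--         rows.append([host, container, mode])
--     return generate_html_table(["Host", "Container", "Mode"], rows) if rows else ""
-- ===== SOURCE B (Python) =====
-- def format_volumes_table(volumes_list):
--     if not volumes_list:
--         return ""
--     # one row-major pass: build the (host, container, mode) triples and, at the
--     # same time, accumulate which of the three columns has any non-blank cell
--     rows = []
--     k0 = k1 = k2 = False
--     for vol in volumes_list:
--         parts = vol.split(":")
--         h = parts[0]
--         if h == ".":
--             h = "(Project directory)"
--         c = parts[1] if len(parts) > 1 else ""
--         m = parts[2] if len(parts) > 2 else ""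
--         rows.append((h, c, m))
--         k0 = k0 or bool(h.strip())
--         k1 = k1 or bool(c.strip())
--         k2 = k2 or bool(m.strip())
--
--     def tag(t, s):
--         return f"<{t} style='border: 1px solid #ddd; padding:4px;'>{s}</{t}>"
--
--     def tr(h, c, m, t):
--         cells = []
--         if k0:
--             cells.append(tag(t, h))
--         if k1:
--             cells.append(tag(t, c))
--         if k2:
--             cells.append(tag(t, m))
--         return "<tr>" + "".join(cells) + "</tr>"
--
--     out = ["<table style='border-collapse: collapse;'>",
--            tr("Host", "Container", "Mode", "th")]
--     for (h, c, m) in rows: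
--         out.append(tr(h, c, m, "td"))
--     out.append("</table>")
--     return "".join(out)
-- ===== Notes on version B (the rewrite author's own statement) =====
-- stated objective: alternative
-- what changed: B makes one row-major pass that builds the row triples and accumulates the three column-non-empty flags simultaneously (instead of A's separate per-column any() scans over all rows), then renders rows by per-flag conditional cell emission and a final join instead of A's index-list filtering plus repeated string concatenation.
import Mathlib
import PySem

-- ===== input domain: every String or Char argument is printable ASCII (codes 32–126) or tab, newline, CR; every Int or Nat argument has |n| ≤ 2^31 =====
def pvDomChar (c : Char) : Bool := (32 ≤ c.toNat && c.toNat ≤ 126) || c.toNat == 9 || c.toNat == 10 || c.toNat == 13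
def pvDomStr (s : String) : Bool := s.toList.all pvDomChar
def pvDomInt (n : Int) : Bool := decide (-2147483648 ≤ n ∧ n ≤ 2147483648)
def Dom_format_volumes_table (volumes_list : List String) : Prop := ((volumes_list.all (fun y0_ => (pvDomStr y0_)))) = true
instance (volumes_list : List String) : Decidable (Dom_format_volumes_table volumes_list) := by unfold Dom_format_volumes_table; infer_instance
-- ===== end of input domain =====

-- B replaces A's per-column any() scans and index-list filtering by a single row-major
-- pass that accumulates three column-non-empty flags while building the rows, rendering
-- each row by per-flag conditional cell emission and one final join (alternative decomposition, same cost).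


-- ===== PORT A =====
def pvFormatHost (host : String) : String :=
  if host == "." then "(Project directory)" else host

-- transliteration of generate_html_table; in format_volumes_table every row has length 3
-- = len(headers), so Python's row[i]/headers[i] never raises and `.getD ""` is unreachable
def pvGenerateHtmlTable (headers : List String) (rows : List (List String)) : String :=
  if rows = [] then ""
  else
    let numCols : Int := headers.length
    let nonEmptyCols : List Int := (PySem.List.pyRange 0 numCols 1).foldl
      (fun acc ci =>
        if rows.any (fun row => PySem.Str.strip ((PySem.List.pyGet? row ci).getD "") != "") then
          acc ++ [ci]
        else acc) []
    let newHeaders := nonEmptyCols.map (fun i => (PySem.List.pyGet? headers i).getD "")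
    let newRows := rows.map (fun row => nonEmptyCols.map (fun i => (PySem.List.pyGet? row i).getD ""))
    let table := "<table style='border-collapse: collapse;'>"
    let table := table ++ ("<tr>" ++ PySem.Str.join ""
      (newHeaders.map (fun h => "<th style='border: 1px solid #ddd; padding:4px;'>" ++ h ++ "</th>")) ++ "</tr>")
    let table := newRows.foldl (fun t row =>
      t ++ ("<tr>" ++ PySem.Str.join ""
        (row.map (fun cell => "<td style='border: 1px solid #ddd; padding:4px;'>" ++ cell ++ "</td>")) ++ "</tr>")) table
    table ++ "</table>"

def format_volumes_table (volumes_list : List String) : String :=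
  let rows := volumes_list.foldl (fun rows vol =>
    -- vol.split(":"): the separator is the non-empty literal ":", so split? is always some
    let parts := (PySem.Str.split? vol ":").getD []
    let host := if parts.length > 0 then pvFormatHost ((PySem.List.pyGet? parts 0).getD "") else ""
    let container := if parts.length > 1 then (PySem.List.pyGet? parts 1).getD "" else ""
    let mode := if parts.length > 2 then (PySem.List.pyGet? parts 2).getD "" else ""
    rows ++ [[host, container, mode]]) []
  if rows ≠ [] then pvGenerateHtmlTable ["Host", "Container", "Mode"] rows else ""

-- ===== PORT B =====
def pvTag (t s : String) : String :=
  "<" ++ t ++ " style='border: 1px solid #ddd; padding:4px;'>" ++ s ++ "</" ++ t ++ ">"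

def pvTr (k0 k1 k2 : Bool) (h c m t : String) : String :=
  "<tr>" ++ PySem.Str.join ""
    ((if k0 then [pvTag t h] else []) ++ (if k1 then [pvTag t c] else []) ++
     (if k2 then [pvTag t m] else [])) ++ "</tr>"

def format_volumes_table_alt (volumes_list : List String) : String :=
  if volumes_list = [] then ""
  else
    let st := volumes_list.foldl
      (fun (st : List (String × String × String) × Bool × Bool × Bool) vol =>
        let parts := (PySem.Str.split? vol ":").getD []   -- ":" ≠ "", split? is always some
        let h0 := (PySem.List.pyGet? parts 0).getD ""     -- split(sep) is never empty: parts[0] exists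
        let h := if h0 == "." then "(Project directory)" else h0
        let c := if parts.length > 1 then (PySem.List.pyGet? parts 1).getD "" else ""
        let m := if parts.length > 2 then (PySem.List.pyGet? parts 2).getD "" else ""
        (st.1 ++ [(h, c, m)],
         st.2.1 || (PySem.Str.strip h != ""),
         st.2.2.1 || (PySem.Str.strip c != ""),
         st.2.2.2 || (PySem.Str.strip m != "")))
      ([], false, false, false)
    let out := ["<table style='border-collapse: collapse;'>",
                pvTr st.2.1 st.2.2.1 st.2.2.2 "Host" "Container" "Mode" "th"]
    let out := st.1.foldl (fun out r => out ++ [pvTr st.2.1 st.2.2.1 st.2.2.2 r.1 r.2.1 r.2.2 "td"]) out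
    PySem.Str.join "" (out ++ ["</table>"])

-- ===== PRECONDITION & SPEC =====
def Spec_format_volumes_table (volumes_list : List String) (out : String) : Prop := out = format_volumes_table_alt volumes_list
instance (volumes_list : List String) (out : String) : Decidable (Spec_format_volumes_table volumes_list out) := by unfold Spec_format_volumes_table; infer_instance

-- ===== CLAIM (what is proved, stated in full; the proofs are below) =====
def Claim_equal_format_volumes_table : Prop := ∀ (volumes_list : List String), Dom_format_volumes_table volumes_list → Spec_format_volumes_table volumes_list (format_volumes_table volumes_list)

-- ===== LEMMAS AND PROOFS =====

-- the three cell values B computes for one volume string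
def pvH (vol : String) : String :=
  let parts := (PySem.Str.split? vol ":").getD []
  let h0 := (PySem.List.pyGet? parts 0).getD ""
  if h0 == "." then "(Project directory)" else h0

def pvC (vol : String) : String :=
  let parts := (PySem.Str.split? vol ":").getD []
  if parts.length > 1 then (PySem.List.pyGet? parts 1).getD "" else ""

def pvM (vol : String) : String :=
  let parts := (PySem.Str.split? vol ":").getD []
  if parts.length > 2 then (PySem.List.pyGet? parts 2).getD "" else ""

theorem pvA_row (vol : String) :
    (let parts := (PySem.Str.split? vol ":").getD []
     let host := if parts.length > 0 then pvFormatHost ((PySem.List.pyGet? parts 0).getD "") else ""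
     let container := if parts.length > 1 then (PySem.List.pyGet? parts 1).getD "" else ""
     let mode := if parts.length > 2 then (PySem.List.pyGet? parts 2).getD "" else ""
     ([host, container, mode] : List String)) = [pvH vol, pvC vol, pvM vol] := by
  simp only [pvH, pvC, pvM, pvFormatHost]
  cases h : (PySem.Str.split? vol ":").getD [] with
  | nil => simp [PySem.List.pyGet?]
  | cons a t => simp

theorem pvA_rows (volumes_list : List String) :
    volumes_list.foldl (fun rows vol =>
      let parts := (PySem.Str.split? vol ":").getD []
      let host := if parts.length > 0 then pvFormatHost ((PySem.List.pyGet? parts 0).getD "") else ""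
      let container := if parts.length > 1 then (PySem.List.pyGet? parts 1).getD "" else ""
      let mode := if parts.length > 2 then (PySem.List.pyGet? parts 2).getD "" else ""
      rows ++ [[host, container, mode]]) []
    = volumes_list.map (fun v => [pvH v, pvC v, pvM v]) := by
  have hf : (fun (rows : List (List String)) vol =>
      let parts := (PySem.Str.split? vol ":").getD []
      let host := if parts.length > 0 then pvFormatHost ((PySem.List.pyGet? parts 0).getD "") else ""
      let container := if parts.length > 1 then (PySem.List.pyGet? parts 1).getD "" else ""
      let mode := if parts.length > 2 then (PySem.List.pyGet? parts 2).getD "" else ""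
      rows ++ [[host, container, mode]])
      = fun (rows : List (List String)) v => rows ++ [[pvH v, pvC v, pvM v]] := by
    funext rows v
    exact congrArg (rows ++ [·]) (pvA_row v)
  rw [hf]
  simpa using PySem.List.foldl_append_singleton_eq_map
    (l := volumes_list) (f := fun v => [pvH v, pvC v, pvM v]) (acc := ([] : List (List String)))

-- B's fold state, characterised
theorem pvB_fold (volumes_list : List String)
    (rows0 : List (String × String × String)) (a0 b0 c0 : Bool) :
    volumes_list.foldl
      (fun (st : List (String × String × String) × Bool × Bool × Bool) vol =>
        let parts := (PySem.Str.split? vol ":").getD []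
        let h0 := (PySem.List.pyGet? parts 0).getD ""
        let h := if h0 == "." then "(Project directory)" else h0
        let c := if parts.length > 1 then (PySem.List.pyGet? parts 1).getD "" else ""
        let m := if parts.length > 2 then (PySem.List.pyGet? parts 2).getD "" else ""
        (st.1 ++ [(h, c, m)],
         st.2.1 || (PySem.Str.strip h != ""),
         st.2.2.1 || (PySem.Str.strip c != ""),
         st.2.2.2 || (PySem.Str.strip m != "")))
      (rows0, a0, b0, c0)
    = (rows0 ++ volumes_list.map (fun v => (pvH v, pvC v, pvM v)),
       a0 || volumes_list.any (fun v => PySem.Str.strip (pvH v) != ""),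
       b0 || volumes_list.any (fun v => PySem.Str.strip (pvC v) != ""),
       c0 || volumes_list.any (fun v => PySem.Str.strip (pvM v) != "")) := by
  induction volumes_list generalizing rows0 a0 b0 c0 with
  | nil => simp
  | cons v t ih =>
    simp only [List.foldl_cons, List.map_cons, List.any_cons]
    rw [ih]
    simp [pvH, pvC, pvM, Bool.or_assoc, List.append_assoc]

theorem pvJoin_empty (l : List (List Char)) : PySem.Chars.join [] l = l.flatten := by
  unfold PySem.Chars.join
  induction l with
  | nil => rfl
  | cons a t ih =>
    cases t with
    | nil => simp [List.intercalate]
    | cons b u =>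
      simp only [List.intercalate] at ih ⊢
      simp [List.intersperse] at ih ⊢
      exact ih

theorem pvFoldlStr (l : List α) (g : α → String) (init : String) :
    l.foldl (fun t x => t ++ g x) init = init ++ PySem.Str.join "" (l.map g) := by
  induction l generalizing init with
  | nil =>
    apply String.toList_inj.mp
    simp

  | cons a t ih =>
    simp only [List.foldl_cons, List.map_cons, ih]
    apply String.toList_inj.mp
    simp [pvJoin_empty]

set_option maxRecDepth 4000 in
theorem pv_main (volumes_list : List String) (hne : volumes_list ≠ []) :
    format_volumes_table volumes_list = format_volumes_table_alt volumes_list := by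
  unfold format_volumes_table format_volumes_table_alt
  rw [pvA_rows, pvB_fold]
  simp only [Bool.false_or, List.nil_append, if_neg hne]
  have hrows : volumes_list.map (fun v => [pvH v, pvC v, pvM v]) ≠ [] := by
    simpa using hne
  rw [if_pos hrows]
  unfold pvGenerateHtmlTable
  rw [if_neg hrows]
  -- reduce the column scan
  have hrange : PySem.List.pyRange 0 (([("Host" : String), "Container", "Mode"].length : Int)) 1 = [0, 1, 2] := by decide
  simp only [hrange]
  have hget0 : ∀ v : String, (PySem.List.pyGet? [pvH v, pvC v, pvM v] (0 : Int)).getD "" = pvH v := by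
    intro v; rfl
  have hget1 : ∀ v : String, (PySem.List.pyGet? [pvH v, pvC v, pvM v] (1 : Int)).getD "" = pvC v := by
    intro v; rfl
  have hget2 : ∀ v : String, (PySem.List.pyGet? [pvH v, pvC v, pvM v] (2 : Int)).getD "" = pvM v := by
    intro v; rfl
  simp only [List.foldl_cons, List.foldl_nil, List.any_map, Function.comp_def,
    hget0, hget1, hget2]
  set K0 := volumes_list.any (fun v => PySem.Str.strip (pvH v) != "") with hK0
  set K1 := volumes_list.any (fun v => PySem.Str.strip (pvC v) != "") with hK1
  set K2 := volumes_list.any (fun v => PySem.Str.strip (pvM v) != "") with hK2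
  rw [pvFoldlStr, PySem.List.foldl_append_singleton_eq_map]
  apply String.toList_inj.mp
  cases K0 <;> cases K1 <;> cases K2 <;>
    simp [pvTr, pvTag, pvJoin_empty, List.map_map, Function.comp_def,
      PySem.List.pyGet?, PySem.List.pyIdx?]

-- ===== VERDICT (by name: the statement is the Claim_ definition above) =====
theorem format_volumes_table_spec : Claim_equal_format_volumes_table := by
  intro volumes_list _
  unfold Spec_format_volumes_table
  by_cases h : volumes_list = []
  · subst h; rfl
  · exact pv_main volumes_list h
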